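-- pv_equiv track=rewrite | github.com/caseyhartnett/TheKilnGod | src/thekilngod/telemetry_math.py | switch_count
-- ===== SOURCE A (Python) =====
-- from collections.abc import Sequence
--
-- def switch_count(binary_values: Sequence[bool | int]) -> int:
--     """Count state transitions in a binary series.
--
--     Transition count is used as a wear proxy for relays and contactors.
--     """
--     if len(binary_values) <= 1:
--         return 0
--     count = 0
--     prev = 1 if binary_values[0] else 0
--     for value in binary_values[1:]:
--         now = 1 if value else 0
--         if now != prev:
--             count += 1
--         prev = now
--     return count
-- ===== SOURCE B (Python) =====
-- def _count(norm):
--     """Transitions in an already 0/1-normalized list, by divide and conquer: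
--     split at the midpoint, count in each half, add 1 if a transition crosses
--     the split boundary."""
--     if len(norm) <= 1:
--         return 0
--     mid = len(norm) // 2
--     boundary = 1 if norm[mid - 1] != norm[mid] else 0
--     return _count(norm[:mid]) + _count(norm[mid:]) + boundary
--
-- def switch_count(binary_values):
--     norm = [1 if v else 0 for v in binary_values]
--     return _count(norm)
-- ===== Notes on version B (the rewrite author's own statement) =====
-- stated objective: alternative
-- what changed: B normalizes to 0/1 and counts transitions by divide and conquer: split the list at the midpoint, recurse on the two halves, and add one if the two elements adjacent to the split differ, instead of A's single linear pass threading a prev flag.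
import Mathlib
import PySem

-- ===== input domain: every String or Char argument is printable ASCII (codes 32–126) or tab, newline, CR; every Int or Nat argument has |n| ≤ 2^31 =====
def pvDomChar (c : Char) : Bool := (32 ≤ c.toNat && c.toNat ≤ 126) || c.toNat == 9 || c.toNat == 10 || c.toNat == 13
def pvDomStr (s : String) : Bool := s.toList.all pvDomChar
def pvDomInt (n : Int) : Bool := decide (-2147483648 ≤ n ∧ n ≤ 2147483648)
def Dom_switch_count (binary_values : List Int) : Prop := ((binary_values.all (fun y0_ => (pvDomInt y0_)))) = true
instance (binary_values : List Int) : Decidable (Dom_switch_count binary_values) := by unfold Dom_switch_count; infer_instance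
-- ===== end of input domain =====

-- B counts transitions by divide and conquer on the 0/1-normalized list (split at the
-- midpoint, recurse, add the boundary transition) instead of A's linear prev-flag pass;
-- objective: alternative algorithm, not faster.
-- ===== PORT A =====
def switch_count (binary_values : List Int) : Int :=
  if binary_values.length ≤ 1 then 0
  else
    match binary_values with
    | [] => 0
    | h :: t =>
      let prev : Int := if h ≠ 0 then 1 else 0
      (t.foldl (fun (s : Int × Int) v =>
          let now : Int := if v ≠ 0 then 1 else 0
          (if now ≠ s.2 then s.1 + 1 else s.1, now)) (0, prev)).1

-- ===== PORT B =====
-- _count(norm): if len <= 1 return 0; mid = len // 2; boundary from norm[mid-1] != norm[mid];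
-- recurse on norm[:mid] and norm[mid:].
def pvCount (norm : List Int) : Int :=
  if norm.length ≤ 1 then 0
  else
    let mid := norm.length / 2
    pvCount (norm.take mid) + pvCount (norm.drop mid) +
      (if PySem.List.pyGet? norm ((mid : Int) - 1) ≠ PySem.List.pyGet? norm (mid : Int)
       then 1 else 0)
termination_by norm.length
decreasing_by
  · simp only [List.length_take]; omega
  · simp only [List.length_drop]; omega

def switch_count_alt (binary_values : List Int) : Int :=
  let norm := binary_values.map (fun v => if v ≠ 0 then (1 : Int) else 0)
  pvCount norm

-- ===== PRECONDITION & SPEC =====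
def Spec_switch_count (binary_values : List Int) (out : Int) : Prop := out = switch_count_alt binary_values
instance (binary_values : List Int) (out : Int) : Decidable (Spec_switch_count binary_values out) := by unfold Spec_switch_count; infer_instance

-- ===== CLAIM (what is proved, stated in full; the proofs are below) =====
def Claim_equal_switch_count : Prop := ∀ (binary_values : List Int), Dom_switch_count binary_values → Spec_switch_count binary_values (switch_count binary_values)

-- ===== LEMMAS AND PROOFS =====

-- adjacent-pair transition count, the common characterisation of both programs
def pc : List Int → Int
  | [] => 0
  | [_] => 0
  | a :: b :: t => (if a ≠ b then 1 else 0) + pc (b :: t)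

theorem pc_append (xs : List Int) (y : Int) (r : List Int) (x : Int)
    (h : xs.getLast? = some x) :
    pc (xs ++ y :: r) = pc xs + (if x ≠ y then 1 else 0) + pc (y :: r) := by
  induction xs with
  | nil => simp at h
  | cons a l ih =>
    cases l with
    | nil =>
      simp only [List.getLast?_singleton, Option.some.injEq] at h
      subst h
      simp [pc]
    | cons b t =>
      have h' : (b :: t).getLast? = some x := by
        simpa [List.getLast?_cons_cons] using h
      have := ih h'
      simp only [List.cons_append, pc] at *
      rw [this]
      ring

theorem pvCount_eq_pc (xs : List Int) : pvCount xs = pc xs := by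
  induction xs using pvCount.induct with
  | case1 xs h =>
    rw [pvCount, if_pos h]
    match xs, h with
    | [], _ => simp [pc]
    | [a], _ => simp [pc]
  | case2 xs h mid ih1 ih2 =>
    rw [pvCount, if_neg h]
    show pvCount (xs.take mid) + pvCount (xs.drop mid) +
        (if PySem.List.pyGet? xs (((mid : Nat) : Int) - 1)
            ≠ PySem.List.pyGet? xs ((mid : Nat) : Int) then 1 else 0)
      = pc xs
    have hmiddef : mid = xs.length / 2 := rfl
    have hmid1 : 1 ≤ mid := by omega
    have hmidlt : mid < xs.length := by omega
    -- the boundary elements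
    obtain ⟨y, hy⟩ : ∃ y, xs[mid]? = some y :=
      ⟨xs[mid], List.getElem?_eq_getElem hmidlt⟩
    obtain ⟨x, hx⟩ : ∃ x, xs[mid - 1]? = some x :=
      ⟨xs[mid - 1], List.getElem?_eq_getElem (by omega)⟩
    have hcast1 : ((mid : Int) - 1) = ((mid - 1 : Nat) : Int) := by omega
    have hget1 : PySem.List.pyGet? xs ((mid : Int) - 1) = some x := by
      rw [hcast1, PySem.List.pyGet?_natCast, hx]
    have hget2 : PySem.List.pyGet? xs (mid : Int) = some y := by
      rw [PySem.List.pyGet?_natCast, hy]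
    have hlast : (xs.take mid).getLast? = some x := by
      rw [List.getLast?_eq_getElem?]
      have hlt : mid ≤ xs.length := le_of_lt hmidlt
      simp only [List.length_take, Nat.min_eq_left hlt]
      rw [List.getElem?_take, if_pos (by omega)]
      exact hx
    have hxsy : xs[mid] = y := by
      have := List.getElem?_eq_getElem (l := xs) (i := mid) hmidlt
      rw [hy] at this; exact (Option.some.injEq _ _).mp this.symm
    have hhead : xs.drop mid = y :: (xs.drop (mid + 1)) := by
      rw [List.drop_eq_getElem_cons hmidlt, hxsy]
    rw [ih1, ih2, hget1, hget2]
    have hsplit : xs = xs.take mid ++ xs.drop mid := (List.take_append_drop mid xs).symm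
    conv_rhs => rw [hsplit]
    rw [hhead]
    rw [pc_append (xs.take mid) y (xs.drop (mid + 1)) x hlast]
    have hxy : (if (some x ≠ some y) then (1 : Int) else 0) = (if x ≠ y then 1 else 0) := by
      by_cases hc : x = y <;> simp [hc]
    rw [hxy, ← hhead]
    ring

-- A's fold against previous flag p equals pc with p consed in front of the normalized tail
theorem fold_eq_pc (t : List Int) (p c : Int) :
    (t.foldl (fun (s : Int × Int) v =>
        let now : Int := if v ≠ 0 then 1 else 0
        (if now ≠ s.2 then s.1 + 1 else s.1, now)) (c, p)).1
      = c + pc (p :: t.map (fun v => if v ≠ 0 then (1 : Int) else 0)) := by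
  induction t generalizing p c with
  | nil => simp [pc]
  | cons v l ih =>
    simp only [List.foldl_cons, List.map_cons, pc]
    rw [ih]
    split_ifs
    all_goals try ring
    all_goals (exfalso; omega)

theorem switch_count_spec : Claim_equal_switch_count := by
  intro bv _
  unfold Spec_switch_count switch_count switch_count_alt
  rw [pvCount_eq_pc]
  match bv with
  | [] => simp [pc]
  | [a] => simp [pc]
  | h :: v :: t =>
    have hlen : ¬ ((h :: v :: t).length ≤ 1) := by simp
    rw [if_neg hlen]
    show ((v :: t).foldl (fun (s : Int × Int) v =>
        let now : Int := if v ≠ 0 then 1 else 0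
        (if now ≠ s.2 then s.1 + 1 else s.1, now))
        (0, if h ≠ 0 then (1 : Int) else 0)).1
      = pc ((h :: v :: t).map (fun v => if v ≠ 0 then (1 : Int) else 0))
    rw [fold_eq_pc]
    simp [List.map_cons, pc]
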